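-- pv_equiv track=rewrite | github.com/bioedca/IVT_K | app/components/plate_grid.py | get_edge_wells
-- ===== SOURCE A (Python) =====
-- from typing import Optional, List, Dict, Any, Tuple
--
-- ROWS_96 = list("ABCDEFGH")
--
-- COLS_96 = list(range(1, 13))
--
-- ROWS_384 = list("ABCDEFGHIJKLMNOP")
--
-- COLS_384 = list(range(1, 25))
--
-- def well_position_to_index(position: str, plate_format: int = 96) -> Tuple[int, int]:
--     """
--     Convert well position string to row, col indices.
--
--     Args:
--         position: Well position (e.g., "A1", "H12")
--         plate_format: 96 or 384
--
--     Returns: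
--         (row_idx, col_idx) tuple
--     """
--     position = position.upper()
--     row_letter = position[0]
--     col_num = int(position[1:])
--
--     rows = ROWS_384 if plate_format == 384 else ROWS_96
--     row_idx = rows.index(row_letter)
--     col_idx = col_num - 1
--
--     return row_idx, col_idx
--
-- def is_edge_well(position: str, plate_format: int = 96) -> bool:
--     """
--     Check if a well position is on the edge of the plate.
--
--     Edge wells are those in the first/last row or first/last column.
--
--     Args:
--         position: Well position (e.g., "A1", "H12")
--         plate_format: 96 or 384
--
--     Returns:
--         True if well is on the edge
--     """
--     row_idx, col_idx = well_position_to_index(position, plate_format)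
--
--     if plate_format == 384:
--         max_row = len(ROWS_384) - 1  # 15 (P)
--         max_col = len(COLS_384) - 1  # 23 (column 24)
--     else:
--         max_row = len(ROWS_96) - 1   # 7 (H)
--         max_col = len(COLS_96) - 1   # 11 (column 12)
--
--     # Check if on first/last row or first/last column
--     return row_idx == 0 or row_idx == max_row or col_idx == 0 or col_idx == max_col
--
-- def get_edge_wells(plate_format: int = 96) -> List[str]:
--     """
--     Get all edge well positions for a plate format.
--
--     Args:
--         plate_format: 96 or 384
--
--     Returns:
--         List of edge well positions
--     """
--     if plate_format == 384:
--         rows = ROWS_384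
--         cols = COLS_384
--     else:
--         rows = ROWS_96
--         cols = COLS_96
--
--     edge_wells = []
--     for row_idx, row in enumerate(rows):
--         for col_idx, col in enumerate(cols):
--             pos = f"{row}{col}"
--             if is_edge_well(pos, plate_format):
--                 edge_wells.append(pos)
--
--     return edge_wells
-- ===== SOURCE B (Python) =====
-- from typing import List
--
-- ROWS_96 = list("ABCDEFGH")
-- COLS_96 = list(range(1, 13))
-- ROWS_384 = list("ABCDEFGHIJKLMNOP")
-- COLS_384 = list(range(1, 25))
--
-- def get_edge_wells(plate_format: int = 96) -> List[str]:
--     """Build the perimeter directly: full first row, then first/last column of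
--     each interior row, then full last row (same row-major order as scanning)."""
--     if plate_format == 384:
--         rows, cols = ROWS_384, COLS_384
--     else:
--         rows, cols = ROWS_96, COLS_96
--     wells = [f"{rows[0]}{c}" for c in cols]
--     for r in rows[1:-1]:
--         wells.append(f"{r}{cols[0]}")
--         wells.append(f"{r}{cols[-1]}")
--     wells.extend(f"{rows[-1]}{c}" for c in cols)
--     return wells
-- ===== Notes on version B (the rewrite author's own statement) =====
-- stated objective: simpler
-- what changed: B constructs the perimeter directly (full first row, first/last column of each interior row, full last row) instead of scanning all R*C wells and re-parsing each position string through is_edge_well.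
import Mathlib
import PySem

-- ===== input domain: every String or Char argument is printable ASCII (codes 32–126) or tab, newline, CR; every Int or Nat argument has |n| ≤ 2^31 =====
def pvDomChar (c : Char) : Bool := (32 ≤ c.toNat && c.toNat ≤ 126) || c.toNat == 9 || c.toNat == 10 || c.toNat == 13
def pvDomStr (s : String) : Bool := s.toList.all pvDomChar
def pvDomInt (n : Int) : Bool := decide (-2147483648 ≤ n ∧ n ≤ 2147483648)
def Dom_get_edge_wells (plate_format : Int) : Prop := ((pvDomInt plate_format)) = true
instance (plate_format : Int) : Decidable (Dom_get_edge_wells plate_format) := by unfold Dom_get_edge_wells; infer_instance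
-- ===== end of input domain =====

-- B builds the perimeter directly (first row, interior rows' first/last column, last row)
-- instead of scanning every well and re-parsing its position string: simpler, same output.

-- ===== PORT A =====
def pvRows96 : List Char := ['A','B','C','D','E','F','G','H']
def pvCols96 : List Int := [1,2,3,4,5,6,7,8,9,10,11,12]
def pvRows384 : List Char := ['A','B','C','D','E','F','G','H','I','J','K','L','M','N','O','P']
def pvCols384 : List Int :=
  [1,2,3,4,5,6,7,8,9,10,11,12,13,14,15,16,17,18,19,20,21,22,23,24]

-- well_position_to_index: none where the Python raises (IndexError/ValueError)
def wellPositionToIndexA (position : String) (plate_format : Int) : Option (Int × Int) :=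
  let position := PySem.Str.upper position
  match PySem.Str.pyGet? position 0, PySem.Int.ofStr? (PySem.Str.slice position (some 1) none) with
  | some row_letter, some col_num =>
      let rows := if plate_format == 384 then pvRows384 else pvRows96
      match PySem.List.index? rows row_letter with
      | some row_idx => some ((row_idx : Int), col_num - 1)
      | none => none
  | _, _ => none

def isEdgeWellA (position : String) (plate_format : Int) : Option Bool :=
  match wellPositionToIndexA position plate_format with
  | none => none
  | some (row_idx, col_idx) =>
      let mr : Int × Int :=
        if plate_format == 384 then ((pvRows384.length : Int) - 1, (pvCols384.length : Int) - 1)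
        else ((pvRows96.length : Int) - 1, (pvCols96.length : Int) - 1)
      some (row_idx == 0 || row_idx == mr.1 || col_idx == 0 || col_idx == mr.2)

def get_edge_wells (plate_format : Int) : List String :=
  let rows := if plate_format == 384 then pvRows384 else pvRows96
  let cols := if plate_format == 384 then pvCols384 else pvCols96
  (PySem.List.enumerate rows 0).foldl (fun edge_wells p =>
    (PySem.List.enumerate cols 0).foldl (fun ew q =>
      let pos : String := String.ofList (p.2 :: PySem.Int.toChars q.2)   -- f"{row}{col}"
      -- Python never raises here (pos is always a valid position): the getD default is unreachable
      if (isEdgeWellA pos plate_format).getD false then ew ++ [pos] else ew)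
      edge_wells)
    []

-- ===== PORT B =====
def get_edge_wells_alt (plate_format : Int) : List String :=
  let rows := if plate_format == 384 then pvRows384 else pvRows96
  let cols := if plate_format == 384 then pvCols384 else pvCols96
  -- rows/cols are literal nonempty lists, so rows[0], rows[-1], cols[0], cols[-1] exist:
  -- the getD defaults are unreachable
  let r0 := (PySem.List.pyGet? rows 0).getD 'A'
  let rl := (PySem.List.pyGet? rows (-1)).getD 'A'
  let c0 := (PySem.List.pyGet? cols 0).getD 0
  let cl := (PySem.List.pyGet? cols (-1)).getD 0
  let first := cols.map (fun c => String.ofList (r0 :: PySem.Int.toChars c))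
  let middle := (PySem.List.slice rows (some 1) (some (-1))).flatMap
    (fun r => [String.ofList (r :: PySem.Int.toChars c0), String.ofList (r :: PySem.Int.toChars cl)])
  let last := cols.map (fun c => String.ofList (rl :: PySem.Int.toChars c))
  first ++ middle ++ last

-- ===== PRECONDITION & SPEC =====
def Spec_get_edge_wells (plate_format : Int) (out : List String) : Prop := out = get_edge_wells_alt plate_format
instance (plate_format : Int) (out : List String) : Decidable (Spec_get_edge_wells plate_format out) := by unfold Spec_get_edge_wells; infer_instance

-- ===== CLAIM (what is proved, stated in full; the proofs are below) =====
def Claim_equal_get_edge_wells : Prop := ∀ (plate_format : Int), Dom_get_edge_wells plate_format → Spec_get_edge_wells plate_format (get_edge_wells plate_format)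

-- ===== LEMMAS AND PROOFS =====

-- Both programs depend on plate_format only through the test `plate_format == 384`.
theorem pvA_ne (pf : Int) (h : (pf == 384) = false) : get_edge_wells pf = get_edge_wells 0 := by
  simp only [get_edge_wells, isEdgeWellA, wellPositionToIndexA, h,
    show ((0 : Int) == 384) = false from rfl]

theorem pvB_ne (pf : Int) (h : (pf == 384) = false) :
    get_edge_wells_alt pf = get_edge_wells_alt 0 := by
  simp only [get_edge_wells_alt, h, show ((0 : Int) == 384) = false from rfl]

-- ===== VERDICT (by name: the statement is the Claim_ definition above) =====
set_option maxRecDepth 4000 in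
theorem get_edge_wells_spec : Claim_equal_get_edge_wells := by
  intro pf _
  show get_edge_wells pf = get_edge_wells_alt pf
  by_cases h : pf = 384
  · subst h; decide
  · rw [pvA_ne pf (by simpa using h), pvB_ne pf (by simpa using h)]; decide
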